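-- pv_equiv track=rewrite | github.com/weixian-zhang/AlgosAmigos | src/Google-FooBar/2. bunny-worker-locations/solution.py | solution
-- ===== SOURCE A (Python) =====
-- def solution(x, y):
--
--     # find starting point by getting nth/xth term of AP
--     # the formula (n)*(n-1) / 2 works by finding Xth term value of x-1. So e.g: to find xth term of 3, n will be 4
--     # (4*(4-1)) / 2 = 6
--
--     x += 1
--     xthTermValue = (x * (x - 1)) // 2
--
--     x -= 1
--     startOfCommonDiff = x
--
--     bunnyId = xthTermValue
--
--     # common differenceis 1, so add 1 to the start of common difference up till (Y - 1)
--     # python will exclude 1 from Y already, so no need to Y-1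
--     for x in range(startOfCommonDiff, (y + startOfCommonDiff) - 1):
--         bunnyId += x
--
--     return str(bunnyId)
-- ===== SOURCE B (Python) =====
-- def solution(x, y):
--     # closed-form arithmetic-series sum: no loop
--     m = max(y - 1, 0)
--     return str(x * (x + 1) // 2 + m * (2 * x + m - 1) // 2)
-- ===== Notes on version B (the rewrite author's own statement) =====
-- stated objective: faster
-- what changed: Replaces the O(y) summation loop over range(x, x+y-1) with the closed-form arithmetic-series formula m*(2x+m-1)/2 (m = max(y-1,0)).
import Mathlib
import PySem

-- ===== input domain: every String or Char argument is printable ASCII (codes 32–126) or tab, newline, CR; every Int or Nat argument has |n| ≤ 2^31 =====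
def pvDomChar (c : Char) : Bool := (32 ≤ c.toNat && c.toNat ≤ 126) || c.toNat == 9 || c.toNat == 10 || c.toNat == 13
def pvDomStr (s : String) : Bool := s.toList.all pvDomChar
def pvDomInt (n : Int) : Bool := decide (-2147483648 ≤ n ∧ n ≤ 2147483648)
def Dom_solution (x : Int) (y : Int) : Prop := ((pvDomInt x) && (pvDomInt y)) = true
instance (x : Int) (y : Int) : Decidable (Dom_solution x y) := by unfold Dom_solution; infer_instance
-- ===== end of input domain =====

-- B replaces A's O(y) summation loop with the closed-form arithmetic-series sum (objective: faster).
-- ===== PORT A =====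
def solution (x : Int) (y : Int) : String :=
  let x1 := x + 1
  let xthTermValue := PySem.Int.floordiv (x1 * (x1 - 1)) 2
  let x2 := x1 - 1
  let startOfCommonDiff := x2
  let bunnyId :=
    (PySem.List.pyRange startOfCommonDiff ((y + startOfCommonDiff) - 1) 1).foldl
      (fun bunnyId x => bunnyId + x) xthTermValue
  PySem.Int.toStr bunnyId

-- ===== PORT B =====
def solution_alt (x : Int) (y : Int) : String :=
  let m := max (y - 1) 0
  PySem.Int.toStr (PySem.Int.floordiv (x * (x + 1)) 2 +
    PySem.Int.floordiv (m * (2 * x + m - 1)) 2)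

-- ===== PRECONDITION & SPEC =====
def Spec_solution (x : Int) (y : Int) (out : String) : Prop := out = solution_alt x y
instance (x : Int) (y : Int) (out : String) : Decidable (Spec_solution x y out) := by unfold Spec_solution; infer_instance

-- ===== CLAIM (what is proved, stated in full; the proofs are below) =====
def Claim_equal_solution : Prop := ∀ (x : Int) (y : Int), Dom_solution x y → Spec_solution x y (solution x y)

-- ===== LEMMAS AND PROOFS =====
theorem pv_two_foldl (n : Nat) (a acc : Int) :
    2 * List.foldl (fun bunnyId x => bunnyId + x) acc
        (PySem.List.pyRange a (a + n) 1) =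
      2 * acc + (n : Int) * (2 * a + n - 1) := by
  induction n generalizing acc with
  | zero => rw [PySem.List.pyRange_one_eq_nil (by omega)]; simp
  | succ n ih =>
    have hs : a + ((n : Int) + 1) = (a + n) + 1 := by ring
    push_cast
    rw [hs, PySem.List.pyRange_one_succ_right (by omega), List.foldl_append]
    simp only [List.foldl_cons, List.foldl_nil]
    have h := ih acc
    push_cast at h
    linear_combination h

-- ===== VERDICT (by name: the statement is the Claim_ definition above) =====
theorem solution_spec : Claim_equal_solution := by
  intro x y _
  unfold Spec_solution solution solution_alt
  simp only []
  congr 1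
  set m : Int := max (y - 1) 0 with hm
  obtain ⟨k, hk⟩ : Even (x * (x + 1)) := Int.even_mul_succ_self x
  obtain ⟨j, hj⟩ : Even (m * (2 * x + m - 1)) := by
    obtain ⟨t, ht⟩ := Int.even_mul_succ_self (m - 1)
    exact ⟨x * m + t, by linear_combination ht⟩
  have hfd1 : PySem.Int.floordiv ((x + 1) * (x + 1 - 1)) 2 = k := by
    rw [PySem.Int.floordiv_eq_ediv_of_pos (by norm_num)]
    have h : (x + 1) * (x + 1 - 1) = 2 * k := by linear_combination hk
    rw [h]; omega
  have hfd2 : PySem.Int.floordiv (x * (x + 1)) 2 = k := by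
    rw [PySem.Int.floordiv_eq_ediv_of_pos (by norm_num)]
    have h : x * (x + 1) = 2 * k := by linarith
    rw [h]; omega
  have hfd3 : PySem.Int.floordiv (m * (2 * x + m - 1)) 2 = j := by
    rw [PySem.Int.floordiv_eq_ediv_of_pos (by norm_num)]
    have h : m * (2 * x + m - 1) = 2 * j := by linarith
    rw [h]; omega
  rw [hfd1, hfd2, hfd3]
  have hx : x + 1 - 1 = x := by ring
  rw [hx]
  by_cases hy : y ≤ 1
  · rw [PySem.List.pyRange_one_eq_nil (by omega)]
    have hm0 : m = 0 := by omega
    rw [hm0] at hj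
    simp at hj
    simp [List.foldl]
    omega
  · have hn : (((y - 1).toNat : Int)) = m := by omega
    have hb : x + (((y - 1).toNat : Int)) = y + x - 1 := by omega
    have h2 := pv_two_foldl (y - 1).toNat x k
    rw [hb, hn] at h2
    linarith
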